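-- pv_equiv track=rewrite | github.com/plmqazoknijb/pythonCodingTest | Lv_1/220213.py | solution
-- ===== SOURCE A (Python) =====
-- def solution(answers):
--     answer = []
--     pattern1 = [1, 2, 3, 4, 5]
--     pattern2 = [2, 1, 2, 3, 2, 4, 2, 5]
--     pattern3 = [3, 3, 1, 1, 2, 2, 4, 4, 5, 5]
--     score = [0, 0, 0]
--
--     for idx, ans in enumerate(answers):
--         if ans == pattern1[idx % len(pattern1)]:
--             score[0] += 1
--         if ans == pattern2[idx % len(pattern2)]:
--             score[1] += 1
--         if ans == pattern3[idx % len(pattern3)]: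
--             score[2] += 1
--
--     for idx, s in enumerate(score):
--         if s == max(score):
--             answer.append(idx + 1)
--
--     return answer
-- ===== SOURCE B (Python) =====
-- def solution(answers):
--     PERIOD = 40  # lcm of the pattern lengths 5, 8, 10
--     patterns = [
--         [1, 2, 3, 4, 5],
--         [2, 1, 2, 3, 2, 4, 2, 5],
--         [3, 3, 1, 1, 2, 2, 4, 4, 5, 5],
--     ]
--     # Aggregate the answers once into a histogram keyed by (position mod PERIOD, answer);
--     # every pattern is then scored from the histogram in O(PERIOD), without rescanning answers.
--     hist = {}
--     for i, a in enumerate(answers):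
--         key = (i % PERIOD, a)
--         hist[key] = hist.get(key, 0) + 1
--     scores = [sum(hist.get((j, p[j % len(p)]), 0) for j in range(PERIOD))
--               for p in patterns]
--     best = max(scores)
--     return [k + 1 for k, s in enumerate(scores) if s == best]
-- ===== Notes on version B (the rewrite author's own statement) =====
-- stated objective: alternative
-- what changed: Instead of comparing every answer against each pattern, B aggregates the answers once into a histogram keyed by (index mod 40, answer) (40 = lcm of the pattern lengths) and then scores each pattern by summing its 40 bucket counts, so scoring never rescans the answers.
import Mathlib
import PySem

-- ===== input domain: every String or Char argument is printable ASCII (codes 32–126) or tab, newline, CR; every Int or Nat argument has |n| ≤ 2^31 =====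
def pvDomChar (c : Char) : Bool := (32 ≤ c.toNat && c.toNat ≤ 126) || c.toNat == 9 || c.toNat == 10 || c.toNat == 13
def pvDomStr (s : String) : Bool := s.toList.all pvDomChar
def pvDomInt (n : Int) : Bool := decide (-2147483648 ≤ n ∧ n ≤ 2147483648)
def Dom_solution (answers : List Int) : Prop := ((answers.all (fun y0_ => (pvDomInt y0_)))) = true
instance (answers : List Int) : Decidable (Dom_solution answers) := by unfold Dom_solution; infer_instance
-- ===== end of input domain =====

-- B aggregates the answers once into a (index mod 40, answer) histogram (40 = lcm of the pattern
-- lengths) and scores each pattern from the 40 buckets instead of comparing every answer to every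
-- pattern; objective: alternative.

-- ===== PORT A =====
def pvStepA (sc : List Int) (p : Int × Int) : List Int :=
  let pattern1 : List Int := [1, 2, 3, 4, 5]
  let pattern2 : List Int := [2, 1, 2, 3, 2, 4, 2, 5]
  let pattern3 : List Int := [3, 3, 1, 1, 2, 2, 4, 4, 5, 5]
  let sc := if p.2 = PySem.List.pyGetD pattern1 (PySem.Int.mod p.1 (pattern1.length : Int)) 0 then sc.set 0 (sc.getD 0 0 + 1) else sc
  let sc := if p.2 = PySem.List.pyGetD pattern2 (PySem.Int.mod p.1 (pattern2.length : Int)) 0 then sc.set 1 (sc.getD 1 0 + 1) else sc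
  if p.2 = PySem.List.pyGetD pattern3 (PySem.Int.mod p.1 (pattern3.length : Int)) 0 then sc.set 2 (sc.getD 2 0 + 1) else sc

def solution (answers : List Int) : List Int :=
  let score := (PySem.List.enumerate answers).foldl pvStepA [0, 0, 0]
  let m := (PySem.List.max? score (fun y => y)).getD 0
  (PySem.List.enumerate score).foldl
    (fun ans p => if p.2 = m then ans ++ [p.1 + 1] else ans) []

-- ===== PORT B =====
def solution_alt (answers : List Int) : List Int :=
  let patterns : List (List Int) :=
    [[1, 2, 3, 4, 5],
     [2, 1, 2, 3, 2, 4, 2, 5],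
     [3, 3, 1, 1, 2, 2, 4, 4, 5, 5]]
  let hist : PySem.Dict (Int × Int) Int :=
    (PySem.List.enumerate answers).foldl
      (fun d q => d.insert (PySem.Int.mod q.1 40, q.2) (d.getD (PySem.Int.mod q.1 40, q.2) 0 + 1))
      PySem.Dict.empty
  let scores := patterns.map (fun p =>
    ((PySem.List.pyRange 0 40 1).map
      (fun j => hist.getD (j, PySem.List.pyGetD p (PySem.Int.mod j (p.length : Int)) 0) 0)).sum)
  let best := (PySem.List.max? scores (fun y => y)).getD 0
  (PySem.List.enumerate scores).foldl
    (fun ans q => if q.2 = best then ans ++ [q.1 + 1] else ans) []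

-- ===== PRECONDITION & SPEC =====
def Spec_solution (answers : List Int) (out : List Int) : Prop := out = solution_alt answers
instance (answers : List Int) (out : List Int) : Decidable (Spec_solution answers out) := by unfold Spec_solution; infer_instance

-- ===== CLAIM (what is proved, stated in full; the proofs are below) =====
def Claim_equal_solution : Prop := ∀ (answers : List Int), Dom_solution answers → Spec_solution answers (solution answers)

-- ===== LEMMAS AND PROOFS =====
def pvCntStep (pat : List Int) (acc : Int) (q : Int × Int) : Int :=
  if q.2 = PySem.List.pyGetD pat (PySem.Int.mod q.1 (pat.length : Int)) 0 then acc + 1 else acc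

-- A's single pass over the answers is three independent counting folds, one per pattern
theorem score_triple (l : List Int) : ∀ (k a b c : Int),
    (PySem.List.enumerate l k).foldl pvStepA [a, b, c] =
      [(PySem.List.enumerate l k).foldl (pvCntStep [1, 2, 3, 4, 5]) a,
       (PySem.List.enumerate l k).foldl (pvCntStep [2, 1, 2, 3, 2, 4, 2, 5]) b,
       (PySem.List.enumerate l k).foldl (pvCntStep [3, 3, 1, 1, 2, 2, 4, 4, 5, 5]) c] := by
  induction l with
  | nil => intro k a b c; simp [PySem.List.enumerate_nil]
  | cons x xs ih =>
    intro k a b c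
    simp only [PySem.List.enumerate_cons, List.foldl_cons]
    rw [show pvStepA [a, b, c] (k, x) =
        [pvCntStep [1, 2, 3, 4, 5] a (k, x),
         pvCntStep [2, 1, 2, 3, 2, 4, 2, 5] b (k, x),
         pvCntStep [3, 3, 1, 1, 2, 2, 4, 4, 5, 5] c (k, x)] by
      simp only [pvStepA, pvCntStep]
      split_ifs <;> rfl]
    exact ih (k + 1) _ _ _

-- one-hot: summing the (w = j)-indicator over j ∈ range(40) picks out the single bucket j = w
theorem onehot (v : Int → Int) (x : Int) (w : Int) (h0 : 0 ≤ w) (hw : w < 40) :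
    ((PySem.List.pyRange 0 40 1).map
      (fun j => (if (w, x) = (j, v j) then (1 : Int) else 0))).sum
    = if x = v w then 1 else 0 := by
  have hzero : ∀ (a b : Int), (∀ j ∈ PySem.List.pyRange a b 1, j ≠ w) →
      ((PySem.List.pyRange a b 1).map
        (fun j => (if (w, x) = (j, v j) then (1 : Int) else 0))).sum = 0 := by
    intro a b h
    apply List.sum_eq_zero
    intro y hy
    simp only [List.mem_map] at hy
    obtain ⟨j, hj, rfl⟩ := hy
    simp [Prod.ext_iff, (h j hj).symm]
  rw [PySem.List.pyRange_one_append 0 w 40 h0 (by omega),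
      PySem.List.pyRange_one_append w (w + 1) 40 (by omega) (by omega),
      PySem.List.pyRange_one_singleton]
  simp only [List.map_append, List.sum_append, List.map_singleton, List.sum_singleton]
  rw [hzero 0 w (by intro j hj; rw [PySem.List.mem_pyRange_one] at hj; omega),
      hzero (w + 1) 40 (by intro j hj; rw [PySem.List.mem_pyRange_one] at hj; omega)]
  simp [Prod.ext_iff]

-- counting matches of a 40-periodic pattern = summing the per-bucket multiplicities
theorem perPattern (p : List Int) (hdvd : p.length ∣ 40) :
    ∀ (xs : List Int) (m : Nat) (acc : Int),
      (PySem.List.enumerate xs (m : Int)).foldl (pvCntStep p) acc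
      = acc + ((PySem.List.pyRange 0 40 1).map
          (fun j => (((PySem.List.enumerate xs (m : Int)).map
              (fun q => (PySem.Int.mod q.1 40, q.2))).count
            (j, PySem.List.pyGetD p (PySem.Int.mod j (p.length : Int)) 0) : Int))).sum := by
  intro xs
  induction xs with
  | nil => intro m acc; simp [PySem.List.enumerate_nil]
  | cons x xs ih =>
    intro m acc
    simp only [PySem.List.enumerate_cons, List.foldl_cons, List.map_cons, List.count_cons,
      Nat.cast_add, Nat.cast_ite, Nat.cast_one, Nat.cast_zero, beq_iff_eq]
    have hm1 : (m : Int) + 1 = ((m + 1 : Nat) : Int) := by push_cast; ring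
    rw [hm1, ih (m + 1) (pvCntStep p acc ((m : Int), x)),
      PySem.List.sum_map_add_int,
      onehot (fun j => PySem.List.pyGetD p (PySem.Int.mod j (p.length : Int)) 0) x
        (PySem.Int.mod (m : Int) 40)
        (PySem.Int.mod_nonneg _ (by omega)) (PySem.Int.mod_lt _ (by omega))]
    have hmod : PySem.Int.mod (PySem.Int.mod (m : Int) 40) (p.length : Int)
        = PySem.Int.mod (m : Int) (p.length : Int) := by
      rw [show (40 : Int) = ((40 : Nat) : Int) from by norm_num,
        PySem.Int.mod_natCast, PySem.Int.mod_natCast, PySem.Int.mod_natCast,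
        Nat.mod_mod_of_dvd m hdvd]
    rw [hmod]
    simp only [pvCntStep]
    split_ifs <;> ring

-- B's histogram lookup is the bucket multiplicity of the keyed answer list
theorem histGetD (answers : List Int) (k : Int × Int) :
    ((PySem.List.enumerate answers).foldl
        (fun d q => d.insert (PySem.Int.mod q.1 40, q.2) (d.getD (PySem.Int.mod q.1 40, q.2) 0 + 1))
        (PySem.Dict.empty : PySem.Dict (Int × Int) Int)).getD k 0
    = (((PySem.List.enumerate answers).map (fun q => (PySem.Int.mod q.1 40, q.2))).count k : Int) := by
  rw [show (List.foldl
        (fun (d : PySem.Dict (Int × Int) Int) (q : Int × Int) =>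
          d.insert (PySem.Int.mod q.1 40, q.2) (d.getD (PySem.Int.mod q.1 40, q.2) 0 + 1))
        PySem.Dict.empty (PySem.List.enumerate answers))
      = (((PySem.List.enumerate answers).map (fun q => (PySem.Int.mod q.1 40, q.2))).foldl
          (fun d x => d.insert x (d.getD x 0 + 1)) PySem.Dict.empty) from
      (List.foldl_map (f := fun q : Int × Int => (PySem.Int.mod q.1 40, q.2))
        (g := fun (d : PySem.Dict (Int × Int) Int) x => d.insert x (d.getD x 0 + 1))
        (l := PySem.List.enumerate answers) (init := PySem.Dict.empty)).symm]
  rw [PySem.Dict.getD_foldl_insert_add_one]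
  simp

-- ===== VERDICT (by name: the statement is the Claim_ definition above) =====
theorem solution_spec : Claim_equal_solution := by
  intro answers _
  show solution answers = solution_alt answers
  simp only [solution, solution_alt, List.map_cons, List.map_nil]
  have pp : ∀ (p : List Int), p.length ∣ 40 →
      (PySem.List.enumerate answers 0).foldl (pvCntStep p) 0
      = ((PySem.List.pyRange 0 40 1).map
          (fun j => (((PySem.List.enumerate answers 0).map
              (fun q => (PySem.Int.mod q.1 40, q.2))).count
            (j, PySem.List.pyGetD p (PySem.Int.mod j (p.length : Int)) 0) : Int))).sum := by
    intro p hdvd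
    simpa using perPattern p hdvd answers 0 0
  rw [score_triple answers 0 0 0 0,
      pp [1, 2, 3, 4, 5] (by norm_num),
      pp [2, 1, 2, 3, 2, 4, 2, 5] (by norm_num),
      pp [3, 3, 1, 1, 2, 2, 4, 4, 5, 5] (by norm_num)]
  simp only [histGetD answers]
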